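-- pv_equiv track=rewrite | github.com/ahorriblename/python_practice | problems/last_digit_factorial.py | get_last_digit
-- ===== SOURCE A (Python) =====
-- def get_last_digit(num):
--     num_length =  len(str(num))
--     last_digit = 0
--
--     for i in range(0, num_length):
--         last_digit = num % 10 ** (i + 1) // 10 ** i
--         if last_digit == 0:
--             continue
--         else:
--             break
--
--     return last_digit
-- ===== SOURCE B (Python) =====
-- def get_last_digit(num):
--     s = str(num)
--     zeros = len(s) - len(s.rstrip("0"))
--     return num // 10 ** zeros % 10
-- ===== Notes on version B (the rewrite author's own statement) =====
-- stated objective: alternative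
-- what changed: B replaces A's low-to-high digit-scanning loop entirely: it counts the trailing zero characters of str(num) with rstrip and extracts the answer in one closed-form expression (num floor-divided by the matching power of ten, then modulo ten), whose Python floor-division semantics reproduce A's positive-modulo outputs on negatives without any loop or branch.
import Mathlib
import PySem

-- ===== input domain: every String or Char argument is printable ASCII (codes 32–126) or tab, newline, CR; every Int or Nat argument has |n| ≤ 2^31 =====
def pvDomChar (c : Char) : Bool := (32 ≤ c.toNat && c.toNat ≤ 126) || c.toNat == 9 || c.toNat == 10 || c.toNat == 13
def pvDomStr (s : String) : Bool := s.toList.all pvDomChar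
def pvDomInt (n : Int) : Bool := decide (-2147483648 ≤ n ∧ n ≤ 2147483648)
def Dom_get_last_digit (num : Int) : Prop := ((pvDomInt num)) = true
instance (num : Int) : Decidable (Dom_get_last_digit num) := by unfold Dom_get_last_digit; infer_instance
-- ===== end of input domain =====

-- B drops A's digit-scanning loop entirely: it counts the trailing '0' characters of
-- str(num) and extracts the answer with one closed-form expression num // 10**zeros % 10.

-- ===== PORT A =====
-- A's for-loop over range(0, num_length) with `break`: recursion on the index list,
-- carrying the `last_digit` variable.  Exponents i and i+1 produced by range(0, len)
-- are nonnegative, so Python's 10 ** i is ported exactly as (10:Int) ^ i.toNat.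
def aLoop (num : Int) : List Int → Int → Int
  | [], last_digit => last_digit
  | i :: rest, _ =>
      let last_digit := PySem.Int.floordiv (PySem.Int.mod num ((10:Int) ^ (i + 1).toNat))
        ((10:Int) ^ i.toNat)
      if last_digit = 0 then aLoop num rest last_digit else last_digit

def get_last_digit (num : Int) : Int :=
  let num_length := PySem.Str.len (PySem.Int.toStr num)
  aLoop num (PySem.List.pyRange 0 num_length 1) 0

-- ===== PORT B =====
-- hand port of s.rstrip("0") (PySem has no rstrip-with-chars): drop '0' code points
-- from the right; exact, since "0" is a single ASCII character.
def rstrip0 (l : List Char) : List Char := ((l.reverse).dropWhile (· == '0')).reverse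

def get_last_digit_alt (num : Int) : Int :=
  let s := PySem.Int.toStr num
  let zeros : Int := PySem.Str.len s - ((rstrip0 s.toList).length : Int)
  PySem.Int.mod (PySem.Int.floordiv num ((10:Int) ^ zeros.toNat)) 10

-- ===== PRECONDITION & SPEC =====
def Spec_get_last_digit (num : Int) (out : Int) : Prop := out = get_last_digit_alt num
instance (num : Int) (out : Int) : Decidable (Spec_get_last_digit num out) := by unfold Spec_get_last_digit; infer_instance

-- ===== CLAIM (what is proved, stated in full; the proofs are below) =====
def Claim_equal_get_last_digit : Prop := ∀ (num : Int), Dom_get_last_digit num → Spec_get_last_digit num (get_last_digit num)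

-- ===== LEMMAS AND PROOFS =====

-- proof-side description of A's loop result: first nonzero low digit within L digits, else 0
def gDig : Int → Nat → Int
  | _, 0 => 0
  | n, L + 1 => if n % 10 = 0 then gDig (n / 10) L else n % 10

-- digit-extraction identity:  (num % 10^(i+1)) // 10^i  =  (num // 10^i) % 10
theorem digit_shift (num : Int) (i : Nat) :
    PySem.Int.floordiv (PySem.Int.mod num ((10:Int) ^ (i + 1))) ((10:Int) ^ i)
      = (num / (10:Int) ^ i) % 10 := by
  have hp : (0:Int) < 10 ^ i := by positivity
  rw [PySem.Int.mod_eq_emod_of_pos (by positivity), PySem.Int.floordiv_eq_ediv_of_pos hp]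
  set p := (10:Int) ^ i with hpdef
  have h1 : (10:Int) ^ (i + 1) = p * 10 := by rw [hpdef]; ring
  rw [h1]
  set q := num / (p * 10) with hqdef
  have hr : num % (p * 10) = num + p * (-(10 * q)) := by rw [Int.emod_def, hqdef]; ring
  have h2 : num % (p * 10) / p = num / p + (-(10 * q)) := by
    rw [hr, Int.add_mul_ediv_left num _ (ne_of_gt hp)]
  have hr0 : 0 ≤ num % (p * 10) := Int.emod_nonneg num (by positivity)
  have hrlt : num % (p * 10) < p * 10 := Int.emod_lt_of_pos num (by positivity)
  have hv0 : 0 ≤ num % (p * 10) / p := Int.ediv_nonneg hr0 (le_of_lt hp)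
  have hvlt : num % (p * 10) / p < 10 := by
    apply Int.ediv_lt_of_lt_mul hp; linarith
  have hmod : (num / p + -(10 * q)) % 10 = num / p % 10 := by
    have : num / p + -(10 * q) = num / p + 10 * (-q) := by ring
    rw [this, Int.add_mul_emod_self_left]
  calc num % (p * 10) / p = (num % (p * 10) / p) % 10 := (Int.emod_eq_of_lt hv0 hvlt).symm
    _ = (num / p + -(10 * q)) % 10 := by rw [h2]
    _ = num / p % 10 := hmod

theorem pyRange_loop (L : Nat) : ∀ (s : Nat) (num : Int),
    aLoop num (PySem.List.pyRange (s : Int) ((s : Int) + (L : Int)) 1) 0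
      = gDig (num / 10 ^ s) L := by
  induction L with
  | zero =>
    intro s num
    rw [PySem.List.pyRange_one_eq_nil (by simp)]
    rfl
  | succ L ih =>
    intro s num
    rw [PySem.List.pyRange_one_cons (by push_cast; omega)]
    show (if _ = 0 then _ else _) = _
    have he1 : ((s : Int) + 1).toNat = s + 1 := by omega
    have he0 : ((s : Int)).toNat = s := by omega
    rw [he1, he0, digit_shift]
    by_cases h : (num / (10:Int) ^ s) % 10 = 0
    · rw [if_pos h, h]
      rw [show ((s:Int) + 1) = ((s + 1 : Nat) : Int) by push_cast; ring]
      rw [show ((s:Int) + ((L + 1 : Nat) : Int)) = (((s + 1 : Nat) : Int) + (L : Int)) by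
        push_cast; ring]
      rw [ih (s + 1) num]
      have hdd : num / (10:Int) ^ s / 10 = num / 10 ^ (s + 1) := by
        rw [Int.ediv_ediv_of_nonneg (by positivity), pow_succ]
      simp only [gDig, if_pos h, hdd]
    · rw [if_neg h]
      simp only [gDig, if_neg h]

theorem toDigitsCore_bound (f : Nat) : ∀ (n : Nat) (l : List Char), n ≤ f →
    ∃ k, (Nat.toDigitsCore 10 (f + 1) n l).length = l.length + k ∧ 1 ≤ k ∧ n < 10 ^ k := by
  induction f with
  | zero =>
    intro n l hn
    have : n = 0 := by omega
    subst this
    refine ⟨1, ?_, by omega, by norm_num⟩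
    simp [Nat.toDigitsCore]
  | succ f ih =>
    intro n l hn
    by_cases h : n / 10 = 0
    · refine ⟨1, ?_, by omega, by omega⟩
      simp [Nat.toDigitsCore, h]
    · have hrec : Nat.toDigitsCore 10 (f + 1 + 1) n l
          = Nat.toDigitsCore 10 (f + 1) (n / 10) (Nat.digitChar (n % 10) :: l) := by
        conv_lhs => rw [Nat.toDigitsCore]
        simp [h]
      obtain ⟨k, hlen, hk1, hklt⟩ := ih (n / 10) (Nat.digitChar (n % 10) :: l) (by omega)
      refine ⟨k + 1, ?_, by omega, ?_⟩
      · rw [hrec, hlen]; simp; omega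
      · have : 10 ^ (k + 1) = 10 * 10 ^ k := by ring
        omega

theorem natAbs_lt_pow_len (num : Int) : num.natAbs < 10 ^ (PySem.Int.toChars num).length := by
  unfold PySem.Int.toChars
  by_cases h : num < 0
  · rw [if_pos h]
    obtain ⟨k, hlen, hk1, hlt⟩ :=
      toDigitsCore_bound num.natAbs num.natAbs [] (le_refl _)
    have : Nat.toDigits 10 num.natAbs = Nat.toDigitsCore 10 (num.natAbs + 1) num.natAbs [] := rfl
    rw [this, List.length_cons, hlen]
    simp only [List.length_nil, Nat.zero_add]
    calc num.natAbs < 10 ^ k := hlt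
      _ ≤ 10 ^ (k + 1) := Nat.pow_le_pow_right (by omega) (by omega)
  · rw [if_neg h]
    obtain ⟨k, hlen, hk1, hlt⟩ :=
      toDigitsCore_bound num.toNat num.toNat [] (le_refl _)
    have : Nat.toDigits 10 num.toNat = Nat.toDigitsCore 10 (num.toNat + 1) num.toNat [] := rfl
    rw [this, hlen]
    simp only [List.length_nil, Nat.zero_add]
    have : num.natAbs = num.toNat := by omega
    omega

-- structural description of Nat.toDigits: most-significant digit first
def charsOf (n : Nat) : List Char :=
  if h : n / 10 = 0 then [Nat.digitChar (n % 10)]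
  else charsOf (n / 10) ++ [Nat.digitChar (n % 10)]
termination_by n
decreasing_by omega

-- trailing-'0' count of a character list
def tz (l : List Char) : Nat := (l.reverse.takeWhile (· == '0')).length

-- number of trailing zero digits of a natural number
def tzNum (n : Nat) : Nat :=
  if n = 0 then 0 else if n % 10 = 0 then tzNum (n / 10) + 1 else 0
termination_by n
decreasing_by omega

theorem toDigitsCore_eq_charsOf (f : Nat) : ∀ (n : Nat) (l : List Char), n ≤ f →
    Nat.toDigitsCore 10 (f + 1) n l = charsOf n ++ l := by
  induction f with
  | zero =>
    intro n l hn
    have : n = 0 := by omega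
    subst this
    simp [Nat.toDigitsCore, charsOf]
  | succ f ih =>
    intro n l hn
    by_cases h : n / 10 = 0
    · rw [charsOf]
      simp [Nat.toDigitsCore, h]
    · have hrec : Nat.toDigitsCore 10 (f + 1 + 1) n l
          = Nat.toDigitsCore 10 (f + 1) (n / 10) (Nat.digitChar (n % 10) :: l) := by
        conv_lhs => rw [Nat.toDigitsCore]
        simp [h]
      rw [hrec, ih (n / 10) _ (by omega)]
      conv_rhs => rw [charsOf]
      rw [dif_neg h]
      simp

theorem toDigits_eq_charsOf (n : Nat) : Nat.toDigits 10 n = charsOf n := by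
  have : Nat.toDigits 10 n = Nat.toDigitsCore 10 (n + 1) n [] := rfl
  rw [this, toDigitsCore_eq_charsOf n n [] (le_refl n), List.append_nil]

theorem digitChar_ne_zero (d : Nat) (h1 : d < 10) (h2 : d ≠ 0) : Nat.digitChar d ≠ '0' := by
  interval_cases d <;> simp_all <;> decide

theorem tz_append_singleton (l : List Char) (c : Char) :
    tz (l ++ [c]) = if c = '0' then tz l + 1 else 0 := by
  unfold tz
  rw [List.reverse_append]
  simp only [List.reverse_cons, List.reverse_nil, List.nil_append, List.singleton_append,
    List.takeWhile_cons]
  by_cases h : c = '0'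
  · simp [h]
  · simp [h]

theorem tz_charsOf (n : Nat) (hn : n ≠ 0) : tz (charsOf n) = tzNum n := by
  induction n using Nat.strong_induction_on with
  | _ n ih =>
    rw [charsOf, tzNum, if_neg hn]
    by_cases h : n / 10 = 0
    · rw [dif_pos h]
      have hlt : n % 10 = n := by omega
      have hne : n % 10 ≠ 0 := by omega
      rw [if_neg hne]
      have := tz_append_singleton [] (Nat.digitChar (n % 10))
      simp only [List.nil_append] at this
      rw [this, if_neg (digitChar_ne_zero _ (by omega) hne)]
    · rw [dif_neg h, tz_append_singleton]
      by_cases hd : n % 10 = 0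
      · rw [if_pos hd, hd]
        have : Nat.digitChar 0 = '0' := by decide
        rw [if_pos this, ih (n / 10) (by omega) h]
      · rw [if_neg hd, if_neg (digitChar_ne_zero _ (by omega) hd)]

theorem tz_charsOf_lt (n : Nat) (hn : n ≠ 0) : tz (charsOf n) < (charsOf n).length := by
  induction n using Nat.strong_induction_on with
  | _ n ih =>
    rw [charsOf]
    by_cases h : n / 10 = 0
    · rw [dif_pos h]
      have hne : n % 10 ≠ 0 := by omega
      have := tz_append_singleton [] (Nat.digitChar (n % 10))
      simp only [List.nil_append] at this
      rw [this, if_neg (digitChar_ne_zero _ (by omega) hne)]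
      simp
    · rw [dif_neg h, tz_append_singleton]
      by_cases hd : n % 10 = 0
      · rw [if_pos (by rw [hd]; decide)]
        have := ih (n / 10) (by omega) h
        simp only [List.length_append, List.length_cons, List.length_nil]
        omega
      · rw [if_neg (digitChar_ne_zero _ (by omega) hd)]
        simp

theorem tz_le_length (l : List Char) : tz l ≤ l.length := by
  unfold tz
  calc (l.reverse.takeWhile (· == '0')).length ≤ l.reverse.length :=
        (List.takeWhile_sublist _).length_le
    _ = l.length := List.length_reverse

theorem tz_cons_of_lt (c : Char) (l : List Char) (h : tz l < l.length) :
    tz (c :: l) = tz l := by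
  unfold tz at *
  rw [List.reverse_cons, List.takeWhile_append]
  rw [if_neg (by rw [List.length_reverse]; omega)]

theorem rstrip0_length (l : List Char) : (rstrip0 l).length = l.length - tz l := by
  unfold rstrip0 tz
  rw [List.length_reverse]
  have := congrArg List.length (List.takeWhile_append_dropWhile (p := (· == '0')) (l := l.reverse))
  rw [List.length_append, List.length_reverse] at this
  omega

-- A's loop value in closed form: divide out the trailing zeros, then take the last digit
theorem gDig_closed (L : Nat) : ∀ (n : Int), n ≠ 0 → n.natAbs < 10 ^ L →
    gDig n L = n / (10:Int) ^ tzNum n.natAbs % 10 := by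
  induction L with
  | zero =>
    intro n hn habs
    simp at habs
    omega
  | succ L ih =>
    intro n hn habs
    simp only [gDig]
    by_cases h : n % 10 = 0
    · rw [if_pos h]
      obtain ⟨m, rfl⟩ : (10:Int) ∣ n := Int.dvd_of_emod_eq_zero h
      have hm : m ≠ 0 := by rintro rfl; simp at hn
      have hdiv : (10:Int) * m / 10 = m := by omega
      have habs' : ((10:Int) * m).natAbs = 10 * m.natAbs := by simp [Int.natAbs_mul]
      have htz : tzNum ((10:Int) * m).natAbs = tzNum m.natAbs + 1 := by
        rw [tzNum, if_neg (by omega), if_pos (by omega)]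
        congr 1
        congr 1
        omega
      rw [hdiv, htz, ih m hm (by rw [pow_succ] at habs; omega)]
      rw [pow_succ, mul_comm ((10:Int) ^ tzNum m.natAbs) 10,
        Int.mul_ediv_mul_of_pos _ _ (by norm_num : (0:Int) < 10)]
    · rw [if_neg h]
      have htz : tzNum n.natAbs = 0 := by
        rw [tzNum, if_neg (by omega), if_neg (by omega)]
      rw [htz, pow_zero, Int.ediv_one]

-- the trailing-zero count B computes on str(num) is tzNum num.natAbs (num ≠ 0)
theorem tz_toChars (num : Int) (hn : num ≠ 0) :
    tz (PySem.Int.toChars num) = tzNum num.natAbs := by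
  unfold PySem.Int.toChars
  by_cases h : num < 0
  · rw [if_pos h, toDigits_eq_charsOf,
      tz_cons_of_lt _ _ (tz_charsOf_lt num.natAbs (by omega)),
      tz_charsOf num.natAbs (by omega)]
  · rw [if_neg h, toDigits_eq_charsOf]
    have : num.toNat = num.natAbs := by omega
    rw [this, tz_charsOf num.natAbs (by omega)]

-- ===== VERDICT (by name: the statement is the Claim_ definition above) =====
theorem get_last_digit_spec : Claim_equal_get_last_digit := by
  intro num _
  show get_last_digit num = get_last_digit_alt num
  by_cases hz : num = 0
  · subst hz; decide
  · show aLoop num (PySem.List.pyRange 0 (PySem.Str.len (PySem.Int.toStr num)) 1) 0 = _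
    have hL : PySem.Str.len (PySem.Int.toStr num) = ((PySem.Int.toChars num).length : Int) := by
      simp [PySem.Int.toList_toStr]
    have hA := pyRange_loop (PySem.Int.toChars num).length 0 num
    simp only [Nat.cast_zero, zero_add, pow_zero, Int.ediv_one] at hA
    rw [hL, hA]
    -- B side
    show _ = PySem.Int.mod (PySem.Int.floordiv num ((10:Int) ^ _)) 10
    have hlist : (PySem.Int.toStr num).toList = PySem.Int.toChars num := PySem.Int.toList_toStr num
    have hle := tz_le_length (PySem.Int.toChars num)
    have hzeros : (PySem.Str.len (PySem.Int.toStr num)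
        - (((rstrip0 (PySem.Int.toStr num).toList).length : Int))).toNat
        = tzNum num.natAbs := by
      rw [hlist, hL, rstrip0_length, tz_toChars num hz]
      have := tz_toChars num hz
      omega
    rw [hzeros, PySem.Int.floordiv_eq_ediv_of_pos (by positivity),
      PySem.Int.mod_eq_emod_of_pos (by norm_num)]
    exact gDig_closed _ num hz (natAbs_lt_pow_len num)
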